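-- pv_equiv track=rewrite | github.com/105-Code/spacex-launch-data | extractor.py | normalizeTimestamp
-- ===== SOURCE A (Python) =====
-- def normalizeTimestamp(text:str):
-- 	#TODO: Mejorar esto
-- 	text = text.lower().replace('i','1').replace(';',':').replace('.',':').replace('::',':').replace('o','0').replace(' ','')
-- 	counter = 0
-- 	final = ''
-- 	for i in text:
-- 		if counter == 2:
-- 			counter = -1
-- 			if i != ':':
-- 				final += ':'+i
-- 			else:
-- 				final += i
-- 		else:
-- 			if i != ':':
-- 				final += i
-- 		counter +=1
-- 	return final
-- ===== SOURCE B (Python) =====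
-- def normalizeTimestamp(text: str):
--     text = text.lower().replace('i','1').replace(';',':').replace('.',':').replace('::',':').replace('o','0').replace(' ','')
--     parts = []
--     for start in range(0, len(text), 3):
--         chunk = text[start:start+3]
--         for ch in chunk[:2]:
--             if ch != ':':
--                 parts.append(ch)
--         if len(chunk) == 3:
--             parts.append(':')
--             if chunk[2] != ':':
--                 parts.append(chunk[2])
--     return ''.join(parts)
-- ===== Notes on version B (the rewrite author's own statement) =====
-- stated objective: alternative
-- what changed: Replaces A's char-by-char loop with a cycling counter state variable by iterating the normalized string in fixed windows of 3 (slice-based chunking), emitting each chunk's characters and the inserted colon directly.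
import Mathlib
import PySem

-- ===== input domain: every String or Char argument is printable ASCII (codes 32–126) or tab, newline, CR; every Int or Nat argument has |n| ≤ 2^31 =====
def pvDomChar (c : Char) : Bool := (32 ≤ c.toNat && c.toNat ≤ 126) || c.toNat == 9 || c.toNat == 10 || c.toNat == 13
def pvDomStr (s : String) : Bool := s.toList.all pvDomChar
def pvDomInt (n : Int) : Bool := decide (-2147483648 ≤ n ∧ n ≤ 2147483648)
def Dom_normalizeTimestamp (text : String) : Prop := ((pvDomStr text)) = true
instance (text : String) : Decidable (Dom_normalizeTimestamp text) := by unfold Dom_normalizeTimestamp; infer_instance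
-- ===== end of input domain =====

-- B replaces A's char-by-char loop with a cycling counter by slicing the normalized
-- string into fixed windows of 3 (no state variable); same return value, alternative decomposition.

-- ===== PORT A =====
-- shared normalization chain (the identical first line of both Pythons)
def ntNorm (text : String) : String :=
  PySem.Str.replace (PySem.Str.replace (PySem.Str.replace (PySem.Str.replace
    (PySem.Str.replace (PySem.Str.replace (PySem.Str.lower text) "i" "1") ";" ":")
    "." ":") "::" ":") "o" "0") " " ""

-- the for-loop of A: state = (counter, final)
def ntLoopA : List Char → Int → List Char → List Char
  | [], _, final => final
  | i :: rest, counter, final =>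
    if counter = 2 then
      -- counter = -1, then counter += 1
      ntLoopA rest (-1 + 1) (if i ≠ ':' then final ++ [':', i] else final ++ [i])
    else
      ntLoopA rest (counter + 1) (if i ≠ ':' then final ++ [i] else final)

def normalizeTimestamp (text : String) : String :=
  String.mk (ntLoopA (ntNorm text).toList 0 [])

-- ===== PORT B =====
-- one window chunk = text[start:start+3]: first two chars kept unless ':',
-- a third char forces a ':' and is kept unless it is ':' itself
def ntKeep (c : Char) : List Char := if c ≠ ':' then [c] else []

def ntChunks : List Char → List Char
  | [] => []
  | [a] => ntKeep a
  | [a, b] => ntKeep a ++ ntKeep b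
  | a :: b :: c :: rest => ntKeep a ++ ntKeep b ++ ([':'] ++ ntKeep c) ++ ntChunks rest

def normalizeTimestamp_alt (text : String) : String :=
  String.mk (ntChunks (ntNorm text).toList)

-- ===== PRECONDITION & SPEC =====
def Spec_normalizeTimestamp (text : String) (out : String) : Prop := out = normalizeTimestamp_alt text
instance (text : String) (out : String) : Decidable (Spec_normalizeTimestamp text out) := by unfold Spec_normalizeTimestamp; infer_instance

-- ===== CLAIM (what is proved, stated in full; the proofs are below) =====
def Claim_equal_normalizeTimestamp : Prop := ∀ (text : String), Dom_normalizeTimestamp text → Spec_normalizeTimestamp text (normalizeTimestamp text)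

-- ===== LEMMAS AND PROOFS =====
theorem ntLoopA_eq_chunks : ∀ (l : List Char) (acc : List Char),
    ntLoopA l 0 acc = acc ++ ntChunks l := by
  intro l
  induction l using ntChunks.induct with
  | case1 => intro acc; simp [ntLoopA, ntChunks]
  | case2 a => intro acc; simp [ntLoopA, ntChunks, ntKeep]; split <;> simp
  | case3 a b =>
    intro acc; simp [ntLoopA, ntChunks, ntKeep]
    split <;> split <;> simp
  | case4 a b c rest ih =>
    intro acc
    show ntLoopA (a :: b :: c :: rest) 0 acc = _
    rw [show ntLoopA (a :: b :: c :: rest) 0 acc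
        = ntLoopA rest 0 (((if a ≠ ':' then acc ++ [a] else acc) ++
            (if b ≠ ':' then [b] else [])) ++ (if c ≠ ':' then [':', c] else [':'])) by
      simp [ntLoopA]; split <;> split <;> split <;> simp_all]
    rw [ih]
    simp [ntChunks, ntKeep]
    split <;> split <;> split <;> simp_all

-- ===== VERDICT (by name: the statement is the Claim_ definition above) =====
theorem normalizeTimestamp_spec : Claim_equal_normalizeTimestamp := by
  intro text _
  show _ = _
  unfold normalizeTimestamp normalizeTimestamp_alt
  rw [ntLoopA_eq_chunks]
  simp
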